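-- pv_equiv track=rewrite | github.com/Oxsmes/FitnessMoses | NutritionNavigator/utils/recovery_recommendations.py | get_workout_intensity
-- ===== SOURCE A (Python) =====
-- from typing import Dict, List, Any, Optional
--
-- def get_workout_intensity(exercises: List[str], fitness_level: str) -> str:
--     """Determine workout intensity based on exercises and fitness level"""
--     compound_movements = [
--         "Squat", "Deadlift", "Bench Press", "Pull-up", "Clean", "Snatch",
--         "Press", "Row", "Lunge"
--     ]
--
--     # Count compound movements
--     compound_count = sum(1 for ex in exercises if any(move in ex for move in compound_movements))
--
--     # Calculate intensity based on compound movements and fitness level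
--     if fitness_level.lower() == "beginner":
--         if compound_count >= 3:
--             return "high"
--         elif compound_count >= 2:
--             return "moderate"
--         return "light"
--     elif fitness_level.lower() == "intermediate":
--         if compound_count >= 4:
--             return "very high"
--         elif compound_count >= 2:
--             return "high"
--         return "moderate"
--     else:  # Advanced
--         if compound_count >= 3:
--             return "very high"
--         elif compound_count >= 2:
--             return "high"
--         return "moderate"
-- ===== SOURCE B (Python) =====
-- _COMPOUND = [
--     "Squat", "Deadlift", "Bench Press", "Pull-up", "Clean", "Snatch",
--     "Press", "Row", "Lunge"
-- ]
--
-- # Labels indexed by the (saturated) compound-movement count; the last entry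
-- # is the label for every count >= len(row) - 1.
-- _ROWS = {
--     "beginner": ["light", "light", "moderate", "high"],
--     "intermediate": ["moderate", "moderate", "high", "high", "very high"],
-- }
-- _ADVANCED_ROW = ["moderate", "moderate", "high", "very high"]
--
--
-- def get_workout_intensity(exercises, fitness_level):
--     """Determine workout intensity based on exercises and fitness level"""
--     row = _ROWS.get(fitness_level.lower(), _ADVANCED_ROW)
--     cap = len(row) - 1
--     count = 0
--     for ex in exercises:
--         if count == cap:
--             break  # counting further cannot change the answer
--         if any(move in ex for move in _COMPOUND):
--             count += 1
--     return row[count]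
-- ===== Notes on version B (the rewrite author's own statement) =====
-- stated objective: alternative
-- what changed: The threshold if/elif ladders disappear: each fitness level maps to a list of labels indexed directly by a compound-movement count that is accumulated with early exit (the loop breaks as soon as the count saturates the row length), so classification is a single list indexing instead of comparisons.
import Mathlib
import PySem

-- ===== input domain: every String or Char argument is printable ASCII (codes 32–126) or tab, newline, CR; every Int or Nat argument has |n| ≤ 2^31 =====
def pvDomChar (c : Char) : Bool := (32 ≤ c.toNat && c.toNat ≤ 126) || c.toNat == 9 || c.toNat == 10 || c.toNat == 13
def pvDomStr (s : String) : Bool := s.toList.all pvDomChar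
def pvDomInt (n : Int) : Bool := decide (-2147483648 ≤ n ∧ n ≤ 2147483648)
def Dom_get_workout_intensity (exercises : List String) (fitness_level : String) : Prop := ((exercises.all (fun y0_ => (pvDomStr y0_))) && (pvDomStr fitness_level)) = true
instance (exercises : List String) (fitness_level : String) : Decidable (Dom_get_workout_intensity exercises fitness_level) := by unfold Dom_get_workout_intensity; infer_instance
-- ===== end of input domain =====

-- B replaces A's threshold if/elif ladders by per-level label rows indexed by a saturating
-- compound count accumulated with early exit (alternative decomposition, same cost class).

-- ===== PORT A =====
def get_workout_intensity (exercises : List String) (fitness_level : String) : String :=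
  let compound_movements : List String :=
    ["Squat", "Deadlift", "Bench Press", "Pull-up", "Clean", "Snatch", "Press", "Row", "Lunge"]
  let compound_count : Int :=
    exercises.foldl
      (fun acc ex => acc + (if compound_movements.any (fun move => PySem.Str.isIn move ex) then 1 else 0)) 0
  if PySem.Str.lower fitness_level == "beginner" then
    if compound_count ≥ 3 then "high"
    else if compound_count ≥ 2 then "moderate"
    else "light"
  else if PySem.Str.lower fitness_level == "intermediate" then
    if compound_count ≥ 4 then "very high"
    else if compound_count ≥ 2 then "high"
    else "moderate"
  else
    if compound_count ≥ 3 then "very high"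
    else if compound_count ≥ 2 then "high"
    else "moderate"

-- ===== PORT B =====
def pvCompound : List String :=
  ["Squat", "Deadlift", "Bench Press", "Pull-up", "Clean", "Snatch", "Press", "Row", "Lunge"]

def pvRows : PySem.Dict String (List String) :=
  PySem.Dict.ofList
    [("beginner", ["light", "light", "moderate", "high"]),
     ("intermediate", ["moderate", "moderate", "high", "high", "very high"])]

def pvAdvancedRow : List String := ["moderate", "moderate", "high", "very high"]

-- Source B's counting loop: for ex in exercises: break once count == cap, else count matches
def pvCountCapped (cap : Int) : List String → Int → Int
  | [], count => count
  | ex :: rest, count =>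
    if count == cap then count
    else pvCountCapped cap rest
      (count + (if pvCompound.any (fun move => PySem.Str.isIn move ex) then 1 else 0))

def get_workout_intensity_alt (exercises : List String) (fitness_level : String) : String :=
  let row := pvRows.getD (PySem.Str.lower fitness_level) pvAdvancedRow
  let cap : Int := (row.length : Int) - 1
  let count := pvCountCapped cap exercises 0
  -- row[count]: always in range since 0 ≤ count ≤ cap < len(row)
  (PySem.List.pyGet? row count).getD ""

-- ===== PRECONDITION & SPEC =====
def Spec_get_workout_intensity (exercises : List String) (fitness_level : String) (out : String) : Prop := out = get_workout_intensity_alt exercises fitness_level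
instance (exercises : List String) (fitness_level : String) (out : String) : Decidable (Spec_get_workout_intensity exercises fitness_level out) := by unfold Spec_get_workout_intensity; infer_instance

-- ===== CLAIM (what is proved, stated in full; the proofs are below) =====
def Claim_equal_get_workout_intensity : Prop := ∀ (exercises : List String) (fitness_level : String), Dom_get_workout_intensity exercises fitness_level → Spec_get_workout_intensity exercises fitness_level (get_workout_intensity exercises fitness_level)

-- ===== LEMMAS AND PROOFS =====

-- A's fold computes the number of matching exercises
theorem pv_foldl_count (p : String → Bool) :
    ∀ (xs : List String) (acc : Int),
      xs.foldl (fun a ex => a + (if p ex then 1 else 0)) acc = acc + (xs.countP p : Int) := by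
  intro xs
  induction xs with
  | nil => intro acc; simp
  | cons x rest ih =>
    intro acc
    simp only [List.foldl_cons, List.countP_cons, ih]
    by_cases h : p x <;> simp [h, Int.add_comm, Int.add_left_comm]

-- B's capped loop computes min(count + matches, cap)
theorem pv_countCapped_eq (cap : Int) :
    ∀ (xs : List String) (c : Int), 0 ≤ c → c ≤ cap →
      pvCountCapped cap xs c
        = min (c + (xs.countP (fun ex => pvCompound.any (fun move => PySem.Str.isIn move ex)) : Int)) cap := by
  intro xs
  induction xs with
  | nil => intro c h0 hc; simp [pvCountCapped]; omega
  | cons x rest ih =>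
    intro c h0 hc
    by_cases h : c = cap
    · have hn : (0 : Int) ≤ ((x :: rest).countP (fun ex => pvCompound.any (fun move => PySem.Str.isIn move ex)) : Int) := Int.natCast_nonneg _
      simp only [pvCountCapped, h, beq_self_eq_true, if_true]
      omega
    · have hb : (c == cap) = false := by simp [h]
      by_cases hm : pvCompound.any (fun move => PySem.Str.isIn move x) = true
      · rw [show pvCountCapped cap (x :: rest) c = pvCountCapped cap rest (c + 1) by
            simp only [pvCountCapped, hb, Bool.false_eq_true, if_false, if_pos hm]]
        rw [ih (c + 1) (by omega) (by omega)]
        rw [List.countP_cons, if_pos hm]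
        push_cast
        omega
      · rw [show pvCountCapped cap (x :: rest) c = pvCountCapped cap rest c by
            simp only [pvCountCapped, hb, Bool.false_eq_true, if_false, if_neg hm, add_zero]]
        rw [ih c h0 hc]
        rw [List.countP_cons, if_neg hm]
        simp
-- ===== VERDICT (by name: the statement is the Claim_ definition above) =====
theorem get_workout_intensity_spec : Claim_equal_get_workout_intensity := by
  intro exercises fitness_level _
  unfold Spec_get_workout_intensity get_workout_intensity get_workout_intensity_alt
  simp only []
  have hA : exercises.foldl
      (fun acc ex => acc + (if (["Squat", "Deadlift", "Bench Press", "Pull-up", "Clean", "Snatch", "Press", "Row", "Lunge"] : List String).any (fun move => PySem.Str.isIn move ex) then 1 else 0)) (0 : Int)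
      = ((exercises.countP (fun ex => pvCompound.any (fun move => PySem.Str.isIn move ex)) : Nat) : Int) := by
    have := pv_foldl_count (fun ex => pvCompound.any (fun move => PySem.Str.isIn move ex)) exercises 0
    simpa [pvCompound] using this
  rw [hA]
  by_cases hb : PySem.Str.lower fitness_level == "beginner"
  · rw [eq_of_beq hb,
      show pvRows.getD "beginner" pvAdvancedRow = ["light", "light", "moderate", "high"] from rfl]
    rw [pv_countCapped_eq _ exercises 0 le_rfl (by norm_num)]
    norm_num
    generalize (List.countP (fun ex => pvCompound.any fun move => PySem.Chars.isIn move.toList ex.toList) exercises) = n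
    by_cases h3 : 3 ≤ n
    · simp only [show (min ((n : Nat) : Int) 3).toNat = 3 from by omega]
      simp [h3]
    · by_cases h2 : 2 ≤ n
      · simp only [show (min ((n : Nat) : Int) 3).toNat = 2 from by omega]
        simp [h3, h2]
      · have : n = 0 ∨ n = 1 := by omega
        rcases this with rfl | rfl <;> simp
  · by_cases hi : PySem.Str.lower fitness_level == "intermediate"
    · rw [eq_of_beq hi,
        show pvRows.getD "intermediate" pvAdvancedRow
          = ["moderate", "moderate", "high", "high", "very high"] from rfl]
      rw [pv_countCapped_eq _ exercises 0 le_rfl (by norm_num)]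
      norm_num
      generalize (List.countP (fun ex => pvCompound.any fun move => PySem.Chars.isIn move.toList ex.toList) exercises) = n
      by_cases h4 : 4 ≤ n
      · simp only [show (min ((n : Nat) : Int) 4).toNat = 4 from by omega]
        simp [h4]
      · by_cases h2 : 2 ≤ n
        · have : n = 2 ∨ n = 3 := by omega
          rcases this with rfl | rfl <;> simp
        · have : n = 0 ∨ n = 1 := by omega
          rcases this with rfl | rfl <;> simp
    · simp only [beq_iff_eq] at hb hi
      rw [show pvRows = PySem.Dict.mk
            [("beginner", ["light", "light", "moderate", "high"]),
             ("intermediate", ["moderate", "moderate", "high", "high", "very high"])] from rfl]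
      simp only [PySem.Dict.getD, PySem.Dict.get?, List.find?]
      rw [show ("beginner" == PySem.Str.lower fitness_level) = false from
            beq_eq_false_iff_ne.mpr (Ne.symm hb),
          show ("intermediate" == PySem.Str.lower fitness_level) = false from
            beq_eq_false_iff_ne.mpr (Ne.symm hi)]
      simp only [Option.map_none, Option.getD_none, pvAdvancedRow]
      rw [pv_countCapped_eq _ exercises 0 le_rfl (by norm_num)]
      have hbne : ¬ (PySem.Str.lower fitness_level = "beginner") := hb
      have hine : ¬ (PySem.Str.lower fitness_level = "intermediate") := hi
      norm_num [hbne, hine]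
      generalize (List.countP (fun ex => pvCompound.any fun move => PySem.Chars.isIn move.toList ex.toList) exercises) = n
      by_cases h3 : 3 ≤ n
      · simp only [show (min ((n : Nat) : Int) 3).toNat = 3 from by omega]
        simp [h3]
      · by_cases h2 : 2 ≤ n
        · simp only [show (min ((n : Nat) : Int) 3).toNat = 2 from by omega]
          simp [h3, h2]
        · have : n = 0 ∨ n = 1 := by omega
          rcases this with rfl | rfl <;> simp
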